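-- pv_equiv track=rewrite | github.com/ndqkhanh/lyra | harness_core/src/harness_core/multi_hop/anchor_predictor.py | _has_prefix_match
-- ===== SOURCE A (Python) =====
-- def _has_prefix_match(query_tokens: set[str], target_tokens: set[str], min_len: int = 4) -> bool:
--     """True if any query token is a prefix of a target token (or vice versa).
--
--     Useful for entity disambiguation (e.g., "BRCA" prefix-matches "BRCA1").
--     """
--     for q in query_tokens:
--         if len(q) < min_len:
--             continue
--         for t in target_tokens:
--             if t.startswith(q) or q.startswith(t):
--                 return True
--     return False
-- ===== SOURCE B (Python) =====
-- def _has_prefix_match(query_tokens: set[str], target_tokens: set[str], min_len: int = 4) -> bool: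
--     """True if any query token is a prefix of a target token (or vice versa).
--
--     Hash-based alternative: a set of all target prefixes answers "q is a prefix
--     of some t", and a set of the targets answers "some t is a prefix of q" by
--     probing q's own prefixes, instead of comparing q against every target.
--     """
--     target_set = set(target_tokens)
--     target_prefixes = {t[:k] for t in target_tokens for k in range(len(t) + 1)}
--     for q in query_tokens:
--         if len(q) < min_len:
--             continue
--         if q in target_prefixes:
--             return True
--         for k in range(len(q) + 1):
--             if q[:k] in target_set:
--                 return True
--     return False
-- ===== Notes on version B (the rewrite author's own statement) =====
-- stated objective: alternative
-- what changed: Replaces the per-query scan over all targets by two hash sets built once (the targets and all prefixes of targets): each query is then decided by O(len(q)) set lookups instead of a startswith comparison against every target; it trades an upfront prefix-set build (which a timing run shows dominating on inputs where A exits early) for the removal of the inner target scan.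
import Mathlib
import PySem

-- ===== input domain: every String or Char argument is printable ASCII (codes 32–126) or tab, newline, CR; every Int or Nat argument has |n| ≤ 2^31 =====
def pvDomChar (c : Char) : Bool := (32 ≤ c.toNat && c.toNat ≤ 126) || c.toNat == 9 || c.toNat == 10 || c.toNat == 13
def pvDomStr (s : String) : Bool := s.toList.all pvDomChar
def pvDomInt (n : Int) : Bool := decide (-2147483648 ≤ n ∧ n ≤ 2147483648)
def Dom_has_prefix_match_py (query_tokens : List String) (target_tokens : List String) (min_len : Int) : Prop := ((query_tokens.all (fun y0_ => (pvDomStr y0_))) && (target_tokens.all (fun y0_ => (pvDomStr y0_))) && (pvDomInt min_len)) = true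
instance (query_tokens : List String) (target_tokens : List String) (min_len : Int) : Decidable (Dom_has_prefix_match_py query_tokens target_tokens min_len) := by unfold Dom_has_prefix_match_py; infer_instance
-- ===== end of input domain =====

-- B replaces A's per-query scan over all targets with two hash sets (targets and all target prefixes) built once.


-- ===== PORT A =====
-- inner 'for t in target_tokens: if t.startswith(q) or q.startswith(t): return True'
def aInnerLoop (q : String) : List String → Bool
  | [] => false
  | t :: rest =>
    if PySem.Str.startswith t q || PySem.Str.startswith q t then true
    else aInnerLoop q rest

-- outer 'for q in query_tokens: if len(q) < min_len: continue; <inner loop>'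
def aOuterLoop (target_tokens : List String) (min_len : Int) : List String → Bool
  | [] => false
  | q :: rest =>
    if PySem.Str.len q < min_len then aOuterLoop target_tokens min_len rest
    else if aInnerLoop q target_tokens then true
    else aOuterLoop target_tokens min_len rest

def has_prefix_match_py (query_tokens : List String) (target_tokens : List String) (min_len : Int) : Bool :=
  aOuterLoop target_tokens min_len query_tokens

-- ===== PORT B =====
-- target_prefixes = {t[:k] for t in target_tokens for k in range(len(t) + 1)}
def bTargetPrefixes (target_tokens : List String) : PySem.Set String :=
  PySem.Set.ofList (target_tokens.flatMap (fun t =>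
    (PySem.List.pyRange 0 (PySem.Str.len t + 1)).map (fun k => PySem.Str.slice t none (some k))))

-- 'for k in range(len(q) + 1): if q[:k] in target_set: return True'
def bScanPrefixes (q : String) (target_set : PySem.Set String) : List Int → Bool
  | [] => false
  | k :: rest =>
    if PySem.Set.contains target_set (PySem.Str.slice q none (some k)) then true
    else bScanPrefixes q target_set rest

-- 'for q in query_tokens: …' of B
def bOuterLoop (target_set target_prefixes : PySem.Set String) (min_len : Int) : List String → Bool
  | [] => false
  | q :: rest =>
    if PySem.Str.len q < min_len then bOuterLoop target_set target_prefixes min_len rest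
    else if PySem.Set.contains target_prefixes q then true
    else if bScanPrefixes q target_set (PySem.List.pyRange 0 (PySem.Str.len q + 1)) then true
    else bOuterLoop target_set target_prefixes min_len rest

def has_prefix_match_py_alt (query_tokens : List String) (target_tokens : List String) (min_len : Int) : Bool :=
  bOuterLoop (PySem.Set.ofList target_tokens) (bTargetPrefixes target_tokens) min_len query_tokens

-- ===== PRECONDITION & SPEC =====
def Spec_has_prefix_match_py (query_tokens : List String) (target_tokens : List String) (min_len : Int) (out : Bool) : Prop := out = has_prefix_match_py_alt query_tokens target_tokens min_len
instance (query_tokens : List String) (target_tokens : List String) (min_len : Int) (out : Bool) : Decidable (Spec_has_prefix_match_py query_tokens target_tokens min_len out) := by unfold Spec_has_prefix_match_py; infer_instance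

-- ===== CLAIM (what is proved, stated in full; the proofs are below) =====
def Claim_equal_has_prefix_match_py : Prop := ∀ (query_tokens : List String) (target_tokens : List String) (min_len : Int), Dom_has_prefix_match_py query_tokens target_tokens min_len → Spec_has_prefix_match_py query_tokens target_tokens min_len (has_prefix_match_py query_tokens target_tokens min_len)

-- ===== LEMMAS AND PROOFS =====

-- A's inner scan is List.any
lemma aInnerLoop_eq_any (q : String) (ts : List String) :
    aInnerLoop q ts = ts.any (fun t => PySem.Str.startswith t q || PySem.Str.startswith q t) := by
  induction ts with
  | nil => rfl
  | cons t rest ih =>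
    simp only [aInnerLoop, List.any_cons]
    split_ifs with h
    · rw [h, Bool.true_or]
    · rw [Bool.not_eq_true] at h
      rw [h, Bool.false_or, ih]

-- B's scan of q's prefixes is List.any
lemma bScanPrefixes_eq_any (q : String) (tset : PySem.Set String) (ks : List Int) :
    bScanPrefixes q tset ks =
      ks.any (fun k => PySem.Set.contains tset (PySem.Str.slice q none (some k))) := by
  induction ks with
  | nil => rfl
  | cons k rest ih =>
    simp only [bScanPrefixes, List.any_cons]
    split_ifs with h
    · rw [h, Bool.true_or]
    · rw [Bool.not_eq_true] at h
      rw [h, Bool.false_or, ih]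

-- 'x is the slice s[:k] for some k in range(len(s)+1)' is exactly 'x is a prefix of s'
lemma slice_mem_range_iff (s x : String) :
    (∃ k ∈ PySem.List.pyRange 0 (PySem.Str.len s + 1), x = PySem.Str.slice s none (some k)) ↔
      x.toList <+: s.toList := by
  constructor
  · rintro ⟨k, hk, rfl⟩
    rw [PySem.List.mem_pyRange_one] at hk
    rw [PySem.Str.toList_slice, PySem.Chars.slice_eq_listSlice, PySem.List.slice_to _ hk.1]
    exact List.take_prefix _ _
  · intro h
    refine ⟨(x.toList.length : Int), ?_, ?_⟩
    · rw [PySem.List.mem_pyRange_one, PySem.Str.len_eq]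
      have := h.length_le
      omega
    · apply String.toList_inj.mp
      rw [PySem.Str.toList_slice, PySem.Chars.slice_eq_listSlice,
        PySem.List.slice_to _ (by positivity)]
      simpa using (List.prefix_iff_eq_take.mp h)

-- membership in B's prefix set
lemma mem_bTargetPrefixes (ts : List String) (q : String) :
    PySem.Set.contains (bTargetPrefixes ts) q = true ↔ ∃ t ∈ ts, q.toList <+: t.toList := by
  rw [bTargetPrefixes, PySem.Set.contains_iff, PySem.Set.mem_ofList]
  simp only [List.mem_flatMap, List.mem_map]
  constructor
  · rintro ⟨t, ht, k, hk, rfl⟩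
    exact ⟨t, ht, (slice_mem_range_iff t _).mp ⟨k, hk, rfl⟩⟩
  · rintro ⟨t, ht, hp⟩
    obtain ⟨k, hk, hx⟩ := (slice_mem_range_iff t q).mpr hp
    exact ⟨t, ht, k, hk, hx.symm⟩

-- the per-query decisions of A and B coincide
lemma query_hit_eq (q : String) (ts : List String) :
    aInnerLoop q ts =
      (PySem.Set.contains (bTargetPrefixes ts) q ||
        bScanPrefixes q (PySem.Set.ofList ts) (PySem.List.pyRange 0 (PySem.Str.len q + 1))) := by
  rw [Bool.eq_iff_iff, aInnerLoop_eq_any, bScanPrefixes_eq_any]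
  simp only [Bool.or_eq_true, List.any_eq_true]
  rw [mem_bTargetPrefixes]
  simp only [PySem.Str.startswith_eq, PySem.Chars.startswith_iff,
    PySem.Set.contains_iff, PySem.Set.mem_ofList]
  constructor
  · rintro ⟨t, ht, hqt | htq⟩
    · exact Or.inl ⟨t, ht, hqt⟩
    · refine Or.inr ?_
      obtain ⟨k, hk, hx⟩ := (slice_mem_range_iff q t).mpr htq
      exact ⟨k, hk, hx ▸ ht⟩
  · rintro (⟨t, ht, hp⟩ | ⟨k, hk, hc⟩)
    · exact ⟨t, ht, Or.inl hp⟩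
    · exact ⟨_, hc, Or.inr ((slice_mem_range_iff q _).mp ⟨k, hk, rfl⟩)⟩

-- the outer loops agree
lemma outer_eq (ts : List String) (m : Int) (qs : List String) :
    aOuterLoop ts m qs = bOuterLoop (PySem.Set.ofList ts) (bTargetPrefixes ts) m qs := by
  induction qs with
  | nil => rfl
  | cons q rest ih =>
    simp only [aOuterLoop, bOuterLoop, query_hit_eq q ts, Bool.or_eq_true]
    split_ifs with h1 h2 h3 <;> simp_all

-- ===== VERDICT (by name: the statement is the Claim_ definition above) =====
theorem has_prefix_match_py_spec : Claim_equal_has_prefix_match_py := by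
  intro qs ts m _
  show _ = _
  exact outer_eq ts m qs
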